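-- pv_equiv track=rewrite | github.com/DeadlyManul/Hog | hog.py | bacon_strategy
-- ===== SOURCE A (Python) =====
-- def is_prime(n):
--     """Возвращает True, если N простое число, иначе возвращает False.
--     1 не является простым числом!
--
--     >>> is_prime(1)
--     False
--     >>> is_prime(2)
--     True
--     >>> is_prime(4)
--     False
--     >>> is_prime(11)
--     True
--     """
--     assert type(n) == int, 'n должна быть целой (int).'
--     assert n >= 0, 'n должна быть неотрицательной.'
--     if n <= 1:
--         return False
--     i = 2
--     while i < n:
--         if n % i == 0:
--             return False
--         i += 1
--     return True
--
-- def next_prime(x):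
--     found = False
--     while not found:
--         x = x + 1
--         if is_prime(x):
--             found = True
--             return x
--
-- def bacon_strategy(score, opponent_score, margin=8, num_rolls=5):
--     """Эта стратегия возвращает 0, если можно получить по крайней мере
--     MARGIN очков, в противном случае возвращает NUM_ROLLS.
--     """
--     free_p = 1 + max([int(i) for i in str(opponent_score)][-2::])
--
--     if is_prime(free_p):
--         free_p = next_prime(free_p)
--
--     if free_p >= margin:
--         return 0
--     else:
--         return num_rolls
-- ===== SOURCE B (Python) =====
-- # free_p after the "bump to next prime if prime" step, indexed by the larger of the
-- # last two decimal digits d (free_p = d+1; it only ever takes the values 1..10).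
-- _FREE_BACON = (1, 3, 5, 4, 7, 6, 11, 8, 9, 10)
--
-- def bacon_strategy(score, opponent_score, margin=8, num_rolls=5):
--     """Return 0 when the free-bacon points reach MARGIN, else NUM_ROLLS."""
--     d = max(opponent_score % 10, opponent_score // 10 % 10)
--     return 0 if _FREE_BACON[d] >= margin else num_rolls
-- ===== Notes on version B (the rewrite author's own statement) =====
-- stated objective: simpler
-- what changed: B drops is_prime/next_prime entirely: since the candidate free-bacon value is always 1..10, the prime bump is precomputed into a 10-entry lookup table indexed by the larger of the last two decimal digits, which B extracts arithmetically (% 10, // 10 % 10) instead of via str() and a [-2:] slice.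
import Mathlib
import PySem

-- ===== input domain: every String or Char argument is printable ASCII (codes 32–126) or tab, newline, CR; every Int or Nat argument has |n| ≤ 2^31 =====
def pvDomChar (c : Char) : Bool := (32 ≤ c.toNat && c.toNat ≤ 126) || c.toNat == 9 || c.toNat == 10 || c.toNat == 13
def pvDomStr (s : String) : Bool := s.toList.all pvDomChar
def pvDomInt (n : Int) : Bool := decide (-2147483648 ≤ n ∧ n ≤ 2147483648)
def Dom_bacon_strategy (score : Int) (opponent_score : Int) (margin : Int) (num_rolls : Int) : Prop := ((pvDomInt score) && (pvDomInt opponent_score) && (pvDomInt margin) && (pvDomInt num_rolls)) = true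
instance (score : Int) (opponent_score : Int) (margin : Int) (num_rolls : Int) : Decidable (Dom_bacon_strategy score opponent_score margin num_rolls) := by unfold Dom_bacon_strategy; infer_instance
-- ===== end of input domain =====

-- B drops is_prime/next_prime: the prime bump only ever applies to values 1..10, so it is
-- precomputed into a 10-entry table indexed by the larger of the last two decimal digits,
-- extracted arithmetically instead of via str() and a [-2:] slice; objective: simpler.

-- ===== PORT A =====
-- 'while i < n' loop of A's is_prime; fuel n.toNat covers every iteration (i starts at 2).
def pvIsPrimeLoopA : Nat → Int → Int → Bool
  | 0, _, _ => true
  | f + 1, n, i =>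
    if i < n then
      (if PySem.Int.mod n i = 0 then false else pvIsPrimeLoopA f n (i + 1))
    else true

def pvIsPrimeA (n : Int) : Bool :=
  -- asserts type(n)==int / n>=0 hold on every call A makes (n ≥ 1 there)
  if n ≤ 1 then false else pvIsPrimeLoopA n.toNat n 2

-- A's 'while not found' loop; the fuel-0 branch is a totality guard only: the call
-- below passes fuel 100 and an argument ≤ 10, so the next prime is found long before.
def pvNextPrimeA : Nat → Int → Int
  | 0, x => x + 1
  | f + 1, x => if pvIsPrimeA (x + 1) then x + 1 else pvNextPrimeA f (x + 1)

def bacon_strategy (score : Int) (opponent_score : Int) (margin : Int) (num_rolls : Int) : Int :=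
  -- int(i) never raises under Pre_ (opponent_score ≥ 0: every character is a digit), so getD 0 is dead
  let digits : List Int := (PySem.Int.toChars opponent_score).map (fun c => (PySem.Int.ofChars? [c]).getD 0)
  -- str(n) is never empty, so max() never raises and getD 0 is dead
  let free_p : Int := 1 + ((PySem.List.max? (PySem.List.slice digits (some (-2)) none) (fun x => x)).getD 0)
  let free_p' : Int := if pvIsPrimeA free_p then pvNextPrimeA 100 free_p else free_p
  if free_p' ≥ margin then 0 else num_rolls

-- ===== PORT B =====
-- Source B's module constant _FREE_BACON
def pvFreeBacon : List Int := [1, 3, 5, 4, 7, 6, 11, 8, 9, 10]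

def bacon_strategy_alt (score : Int) (opponent_score : Int) (margin : Int) (num_rolls : Int) : Int :=
  let d : Int := max (PySem.Int.mod opponent_score 10) (PySem.Int.mod (PySem.Int.floordiv opponent_score 10) 10)
  -- _FREE_BACON[d]: d is always 0..9, in range, so getD 0 is dead
  if (PySem.List.pyGet? pvFreeBacon d).getD 0 ≥ margin then 0 else num_rolls

-- ===== PRECONDITION & SPEC =====
-- Pre_ excludes opponent_score < 0, on which A raises ValueError: int('-') on the sign character of str(opponent_score).
def Pre_bacon_strategy (score : Int) (opponent_score : Int) (margin : Int) (num_rolls : Int) : Prop :=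
  0 ≤ opponent_score
instance (score : Int) (opponent_score : Int) (margin : Int) (num_rolls : Int) : Decidable (Pre_bacon_strategy score opponent_score margin num_rolls) := by unfold Pre_bacon_strategy; infer_instance

def pvWitness_bacon_strategy : Int × Int × Int × Int := (0, 91, 8, 5)

def Spec_bacon_strategy (score : Int) (opponent_score : Int) (margin : Int) (num_rolls : Int) (out : Int) : Prop := out = bacon_strategy_alt score opponent_score margin num_rolls
instance (score : Int) (opponent_score : Int) (margin : Int) (num_rolls : Int) (out : Int) : Decidable (Spec_bacon_strategy score opponent_score margin num_rolls out) := by unfold Spec_bacon_strategy; infer_instance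

-- ===== CLAIM (what is proved, stated in full; the proofs are below) =====
def Claim_equal_bacon_strategy : Prop := ∀ (score : Int) (opponent_score : Int) (margin : Int) (num_rolls : Int), Dom_bacon_strategy score opponent_score margin num_rolls → Pre_bacon_strategy score opponent_score margin num_rolls → Spec_bacon_strategy score opponent_score margin num_rolls (bacon_strategy score opponent_score margin num_rolls)

-- ===== LEMMAS AND PROOFS =====

-- Accumulator lemma for core's Nat.toDigitsCore.
lemma pv_toDigitsCore_acc (f : Nat) : ∀ (n : Nat) (ds : List Char),
    Nat.toDigitsCore 10 f n ds = Nat.toDigitsCore 10 f n [] ++ ds := by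
  induction f with
  | zero => intro n ds; simp [Nat.toDigitsCore]
  | succ f ih =>
    intro n ds
    simp only [Nat.toDigitsCore]
    by_cases h : n / 10 = 0
    · simp [h]
    · simp only [h, if_false]
      rw [ih (n / 10) (_ :: ds), ih (n / 10) [_]]
      simp

-- Fuel irrelevance for Nat.toDigitsCore (any fuel above the argument).
lemma pv_toDigitsCore_fuel : ∀ (n f1 f2 : Nat), n < f1 → n < f2 →
    Nat.toDigitsCore 10 f1 n [] = Nat.toDigitsCore 10 f2 n [] := by
  intro n
  induction n using Nat.strong_induction_on with
  | _ n ih =>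
    intro f1 f2 h1 h2
    obtain ⟨g1, rfl⟩ : ∃ g, f1 = g + 1 := ⟨f1 - 1, by omega⟩
    obtain ⟨g2, rfl⟩ : ∃ g, f2 = g + 1 := ⟨f2 - 1, by omega⟩
    simp only [Nat.toDigitsCore]
    by_cases h : n / 10 = 0
    · simp [h]
    · simp only [h, if_false]
      rw [pv_toDigitsCore_acc g1, pv_toDigitsCore_acc g2]
      congr 1
      exact ih (n / 10) (by omega) g1 g2 (by omega) (by omega)

lemma pv_toDigits_base (n : Nat) (h : n < 10) : Nat.toDigits 10 n = [Nat.digitChar n] := by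
  have h0 : n / 10 = 0 := by omega
  simp [Nat.toDigits, Nat.toDigitsCore, h0, Nat.mod_eq_of_lt h]

lemma pv_toDigits_step (n : Nat) (h : 10 ≤ n) :
    Nat.toDigits 10 n = Nat.toDigits 10 (n / 10) ++ [Nat.digitChar (n % 10)] := by
  have h0 : ¬ (n / 10 = 0) := by omega
  simp only [Nat.toDigits, Nat.toDigitsCore, h0, if_false]
  rw [pv_toDigitsCore_acc n (n / 10) [Nat.digitChar (n % 10)]]
  congr 1
  exact pv_toDigitsCore_fuel (n / 10) n (n / 10 + 1) (by omega) (by omega)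

lemma pv_toDigits_last (n : Nat) (h : 0 < n) :
    ∃ pre, Nat.toDigits 10 n = pre ++ [Nat.digitChar (n % 10)] := by
  by_cases h10 : n < 10
  · exact ⟨[], by rw [pv_toDigits_base n h10, Nat.mod_eq_of_lt h10]; simp⟩
  · exact ⟨_, pv_toDigits_step n (by omega)⟩

-- int() applied to one decimal digit character.
lemma pv_int_of_digitChar (d : Nat) (h : d < 10) :
    (PySem.Int.ofChars? [Nat.digitChar d]).getD 0 = (d : Int) := by
  interval_cases d <;> decide

-- xs[-2:] of a list ending in two known elements, and max() of a two-element list.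
lemma pv_slice_last_two (X : List Int) (a b : Int) :
    PySem.List.slice (X ++ [a, b]) (some (-2)) none = [a, b] := by
  rw [PySem.List.slice_from_neg_ofNat _ 2 (by omega)]
  have h : (X ++ [a, b]).length - 2 = X.length := by simp
  rw [h, List.drop_left]

lemma pv_max2_getD (a b : Int) :
    (PySem.List.max? [a, b] (fun x => x)).getD 0 = max a b := by
  rw [PySem.List.max?_id_cons]
  simp

-- A's max over the last two characters of str(m) equals the arithmetic digit maximum.
lemma pv_lastTwoMax (m : Nat) :
    (PySem.List.max? (PySem.List.slice ((Nat.toDigits 10 m).map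
        (fun c => (PySem.Int.ofChars? [c]).getD 0)) (some (-2)) none) (fun x => x)).getD 0
      = ((max (m / 10 % 10) (m % 10) : Nat) : Int) := by
  by_cases h10 : m < 10
  · rw [pv_toDigits_base m h10]
    rw [PySem.List.slice_from_neg_ofNat _ 2 (by omega)]
    simp only [List.map_cons, List.map_nil, List.length_cons, List.length_nil]
    rw [show (0 + 1 - 2 : Nat) = 0 by omega, List.drop_zero]
    rw [PySem.List.max?_id_cons]
    simp only [List.foldl_nil, Option.getD_some]
    rw [pv_int_of_digitChar m h10]
    have h1 : m / 10 % 10 = 0 := by omega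
    have h2 : m % 10 = m := by omega
    rw [h1, h2]
    simp
  · obtain ⟨pre, hpre⟩ := pv_toDigits_last (m / 10) (by omega)
    rw [pv_toDigits_step m (by omega), hpre, List.append_assoc]
    have hmap : (pre ++ ([(m / 10 % 10).digitChar] ++ [(m % 10).digitChar])).map
          (fun c => (PySem.Int.ofChars? [c]).getD 0)
        = (pre.map (fun c => (PySem.Int.ofChars? [c]).getD 0))
            ++ [((m / 10 % 10 : Nat) : Int), ((m % 10 : Nat) : Int)] := by
      simp only [List.map_append, List.map_cons, List.map_nil]
      rw [pv_int_of_digitChar (m / 10 % 10) (by omega), pv_int_of_digitChar (m % 10) (by omega)]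
      simp
    rw [hmap, pv_slice_last_two, pv_max2_getD]
    exact (Nat.cast_max _ _).symm

-- A's prime-bump pipeline on 1 + D, D ≤ 9, equals B's table entry at index D.
lemma pv_pipeline (D : Nat) (hD : D ≤ 9) :
    (if pvIsPrimeA (1 + (D : Int)) then pvNextPrimeA 100 (1 + (D : Int)) else (1 + (D : Int)))
      = (PySem.List.pyGet? pvFreeBacon (D : Int)).getD 0 := by
  interval_cases D <;> decide

-- ===== VERDICT (by name: the statement is the Claim_ definition above) =====
theorem bacon_strategy_spec : Claim_equal_bacon_strategy := by
  intro score opponent_score margin num_rolls hdom hpre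
  simp only [Pre_bacon_strategy] at hpre
  obtain ⟨m, rfl⟩ : ∃ m : Nat, opponent_score = (m : Int) :=
    ⟨opponent_score.toNat, (Int.toNat_of_nonneg hpre).symm⟩
  unfold Spec_bacon_strategy bacon_strategy bacon_strategy_alt
  simp only [PySem.Int.toChars]
  rw [if_neg (by omega : ¬ ((m : Int) < 0)), Int.toNat_natCast]
  rw [pv_lastTwoMax m]
  have hm1 : PySem.Int.mod ((m : Nat) : Int) 10 = ((m % 10 : Nat) : Int) := by
    exact_mod_cast PySem.Int.mod_natCast m 10
  have hm2 : PySem.Int.floordiv ((m : Nat) : Int) 10 = ((m / 10 : Nat) : Int) := by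
    exact_mod_cast PySem.Int.floordiv_natCast m 10
  have hm3 : PySem.Int.mod ((m / 10 : Nat) : Int) 10 = ((m / 10 % 10 : Nat) : Int) := by
    exact_mod_cast PySem.Int.mod_natCast (m / 10) 10
  rw [hm1, hm2, hm3]
  have hd : max ((m % 10 : Nat) : Int) ((m / 10 % 10 : Nat) : Int)
      = ((max (m / 10 % 10) (m % 10) : Nat) : Int) := by
    rw [max_comm]; exact (Nat.cast_max _ _).symm
  rw [hd]
  rw [show (1 : Int) + ((max (m / 10 % 10) (m % 10) : Nat) : Int)
        = 1 + ((max (m / 10 % 10) (m % 10) : Nat) : Int) from rfl,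
      pv_pipeline (max (m / 10 % 10) (m % 10)) (by omega)]
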